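-- pv_equiv track=rewrite | github.com/antontomusiak/TopCoder | srm203/user_name.py | newMember
-- ===== SOURCE A (Python) =====
-- def newMember(existingNames, newName):
-- 	exists = True
-- 	tmp = 1
-- 	tmp2 = newName
-- 	while exists:
-- 		if tmp2 in existingNames:
-- 			tmp2 = newName + str(tmp)
-- 			tmp += 1
-- 		else: return tmp2
-- ===== SOURCE B (Python) =====
-- def parse_index(s):
--     # value of a canonical decimal suffix ("0","1","2",...; not "", "007", "+3"), else None
--     if not s or (s[0] == "0" and s != "0"):
--         return None
--     v = 0
--     for ch in s:
--         if not ("0" <= ch <= "9"):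
--             return None
--         v = 10 * v + ord(ch) - 48
--     return v
--
-- def newMember(existingNames, newName):
--     # Index the taken numeric suffixes once, then compute the first gap by a
--     # sort-and-scan, instead of probing candidate strings one by one.
--     if newName not in existingNames:
--         return newName
--     L = len(newName)
--     taken = set()
--     for name in existingNames:
--         v = parse_index(name[L:]) if name.startswith(newName) else None
--         if v is not None:
--             taken.add(v)
--     k = 1
--     for v in sorted(taken):
--         if v == k:
--             k += 1
--         elif v > k:
--             break
--     return newName + str(k)
-- ===== Notes on version B (the rewrite author's own statement) =====
-- stated objective: alternative
-- what changed: B indexes the input once, parsing each name's suffix after newName as a canonical decimal index into a set, then sorts the taken indices and scans for the first gap, instead of A's loop that probes the candidate strings newName, newName+'1', newName+'2', ... one by one against the list.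
import Mathlib
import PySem

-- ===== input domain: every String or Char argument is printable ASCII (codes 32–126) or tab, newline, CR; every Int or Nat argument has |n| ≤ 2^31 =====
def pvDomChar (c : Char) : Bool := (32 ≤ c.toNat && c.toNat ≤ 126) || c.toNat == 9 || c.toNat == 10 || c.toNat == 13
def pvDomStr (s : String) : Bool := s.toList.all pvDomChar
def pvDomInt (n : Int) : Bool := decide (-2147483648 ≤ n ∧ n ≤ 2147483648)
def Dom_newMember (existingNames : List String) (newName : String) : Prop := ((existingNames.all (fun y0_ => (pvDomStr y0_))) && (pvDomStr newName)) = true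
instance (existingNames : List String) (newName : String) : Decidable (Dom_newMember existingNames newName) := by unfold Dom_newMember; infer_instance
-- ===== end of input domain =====

-- B indexes the taken numeric suffixes once and computes the first free index by a
-- sort-and-scan for the first gap, instead of A's probe of candidate strings one by one
-- against the list (objective: alternative algorithm).

-- ===== PORT A =====
-- A's while-loop; fuel existingNames.length + 1 is enough: the probed candidates are
-- pairwise distinct strings, so at most existingNames.length of them can be members.
def pvProbeA (existingNames : List String) (newName : String) : Nat → Int → String → String
  | 0, _, tmp2 => tmp2
  | fuel + 1, tmp, tmp2 =>
      if tmp2 ∈ existingNames then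
        pvProbeA existingNames newName fuel (tmp + 1) (newName ++ PySem.Int.toStr tmp)
      else tmp2

def newMember (existingNames : List String) (newName : String) : String :=
  pvProbeA existingNames newName (existingNames.length + 1) 1 newName

-- ===== PORT B =====
-- the digit loop of parse_index ('for ch in s: …')
def pvParseGo (v : Int) : List Char → Option Int
  | [] => some v
  | ch :: t =>
      if '0' ≤ ch ∧ ch ≤ '9' then pvParseGo (10 * v + (ch.toNat : Int) - 48) t else none

-- parse_index: value of a canonical decimal suffix, else none
def pvParseIndex (s : List Char) : Option Int :=
  match s with
  | [] => none
  | c :: _ => if c = '0' ∧ s ≠ ['0'] then none else pvParseGo 0 s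

-- the indexing pass: set of numeric suffix values already taken after newName
def pvTaken (existingNames : List String) (newName : String) : PySem.Set Int :=
  existingNames.foldl
    (fun taken name =>
      match (if PySem.Str.startswith name newName then
               pvParseIndex (PySem.Str.slice name (some (PySem.Str.len newName)) none).toList
             else none) with
      | some v => PySem.Set.add taken v
      | none => taken)
    PySem.Set.empty

-- the gap scan over sorted(taken) ('for v in sorted(taken): …')
def pvScan (newName : String) : List Int → Int → String
  | [], k => newName ++ PySem.Int.toStr k
  | v :: rest, k =>
      if v = k then pvScan newName rest (k + 1)
      else if k < v then newName ++ PySem.Int.toStr k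
      else pvScan newName rest k

def newMember_alt (existingNames : List String) (newName : String) : String :=
  if newName ∉ existingNames then newName
  else pvScan newName (PySem.List.sorted (pvTaken existingNames newName) (fun x => x) false) 1

-- ===== PRECONDITION & SPEC =====
def Spec_newMember (existingNames : List String) (newName : String) (out : String) : Prop := out = newMember_alt existingNames newName
instance (existingNames : List String) (newName : String) (out : String) : Decidable (Spec_newMember existingNames newName out) := by unfold Spec_newMember; infer_instance

-- ===== CLAIM (what is proved, stated in full; the proofs are below) =====
def Claim_equal_newMember : Prop := ∀ (existingNames : List String) (newName : String), Dom_newMember existingNames newName → Spec_newMember existingNames newName (newMember existingNames newName)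

-- ===== LEMMAS AND PROOFS =====

-- characters of decimal digit strings
lemma pv_digitChar_toNat {m : Nat} (h : m < 10) : (Nat.digitChar m).toNat = 48 + m := by
  interval_cases m <;> decide

lemma pv_digitChar_eq {c : Char} (h1 : '0' ≤ c) (h2 : c ≤ '9') :
    Nat.digitChar (c.toNat - 48) = c := by
  have h1' : 48 ≤ c.toNat := h1
  have h2' : c.toNat ≤ 57 := h2
  have hofn := Char.ofNat_toNat c
  rw [← hofn]
  interval_cases h : c.toNat <;> decide

lemma pv_digit_of_mem_toDigits {n : Nat} {c : Char} (h : c ∈ Nat.toDigits 10 n) :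
    '0' ≤ c ∧ c ≤ '9' := by
  have := Nat.isDigit_of_mem_toDigits (b := 10) (by norm_num) (by norm_num) h
  simp [Char.isDigit] at this
  exact ⟨this.1, this.2⟩

-- the digit loop succeeds on digit strings and computes the left fold of the digit values
lemma pv_go_digits {s : List Char} (h : ∀ c ∈ s, '0' ≤ c ∧ c ≤ '9') (v : Int) :
    pvParseGo v s = some (s.foldl (fun a c => 10 * a + (c.toNat : Int) - 48) v) := by
  induction s generalizing v with
  | nil => rfl
  | cons c t ih =>
      have hc := h c (by simp)
      simp only [pvParseGo, if_pos hc, List.foldl_cons]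
      exact ih (fun d hd => h d (by simp [hd])) _

lemma pv_go_some {s : List Char} {v w : Int} (h : pvParseGo v s = some w) :
    ∀ c ∈ s, '0' ≤ c ∧ c ≤ '9' := by
  induction s generalizing v with
  | nil => simp
  | cons c t ih =>
      simp only [pvParseGo] at h
      split_ifs at h with hc
      · intro d hd
        rcases List.mem_cons.mp hd with rfl | hd
        · exact hc
        · exact ih h d hd

-- the fold over the decimal digits of n recovers n
lemma pv_foldl_toDigits (n : Nat) : ∀ v : Int,
    (Nat.toDigits 10 n).foldl (fun a c => 10 * a + (c.toNat : Int) - 48) v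
      = v * 10 ^ (Nat.toDigits 10 n).length + n := by
  induction n using Nat.strong_induction_on with
  | _ n ih =>
      intro v
      by_cases h : n < 10
      · rw [Nat.toDigits_of_lt_base h]
        simp [pv_digitChar_toNat h]
        ring
      · rw [Nat.toDigits_of_base_le (by norm_num) (by omega)]
        rw [List.foldl_append]
        rw [ih (n / 10) (by omega) v]
        simp [pv_digitChar_toNat (Nat.mod_lt n (by norm_num))]
        have : (n : Int) = 10 * ((n / 10 : Nat) : Int) + ((n % 10 : Nat) : Int) := by
          omega
        ring_nf
        omega

-- the leading digit of n ≥ 1 is not '0'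
lemma pv_head_ne_zero {n : Nat} (hn : 1 ≤ n) :
    ∀ {c : Char}, (Nat.toDigits 10 n).head? = some c → c ≠ '0' := by
  induction n using Nat.strong_induction_on with
  | _ n ih =>
      intro c hc
      by_cases h : n < 10
      · rw [Nat.toDigits_of_lt_base h] at hc
        simp at hc
        subst hc
        interval_cases n <;> decide
      · rw [Nat.toDigits_of_base_le (by norm_num) (by omega)] at hc
        rw [List.head?_append_of_ne_nil] at hc
        · exact ih (n / 10) (by omega) (by omega) hc
        · exact List.ne_nil_of_length_pos Nat.length_toDigits_pos

-- a nonempty digit string with no leading zero is the decimal expansion of its value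
lemma pv_canon : ∀ (s : List Char), s ≠ [] → (∀ c ∈ s, '0' ≤ c ∧ c ≤ '9') →
    s.head? ≠ some '0' →
    Nat.toDigits 10 ((s.foldl (fun a c => 10 * a + (c.toNat : Int) - 48) 0).toNat) = s
      ∧ 1 ≤ s.foldl (fun a c => 10 * a + (c.toNat : Int) - 48) 0 := by
  intro s
  induction s using List.reverseRecOn with
  | nil => intro h; exact absurd rfl h
  | append_singleton s' c ih =>
      intro _ hdig hhead
      rcases eq_or_ne s' [] with rfl | hs'
      · -- single character
        have hc := hdig c (by simp)
        have h1 : 48 ≤ c.toNat := hc.1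
        have h2 : c.toNat ≤ 57 := hc.2
        have hne : c ≠ '0' := by
          intro hh
          subst hh
          simp at hhead
        have hcn : c.toNat ≠ 48 := by
          intro h
          apply hne
          have := Char.ofNat_toNat c
          rw [← this, h]
        simp only [List.nil_append, List.foldl_cons, List.foldl_nil]
        constructor
        · have hv : ((10 * (0:Int) + (c.toNat : Int) - 48)).toNat = c.toNat - 48 := by omega
          rw [hv, Nat.toDigits_of_lt_base (by omega), pv_digitChar_eq hc.1 hc.2]
        · omega
      · -- s' nonempty
        have hhead' : s'.head? ≠ some '0' := by
          rwa [List.head?_append_of_ne_nil _ hs'] at hhead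
        have hdig' : ∀ d ∈ s', '0' ≤ d ∧ d ≤ '9' := fun d hd => hdig d (by simp [hd])
        obtain ⟨hrep, hge⟩ := ih hs' hdig' hhead'
        have hc := hdig c (by simp)
        have h1 : 48 ≤ c.toNat := hc.1
        have h2 : c.toNat ≤ 57 := hc.2
        set v' := s'.foldl (fun a c => 10 * a + (c.toNat : Int) - 48) 0 with hv'
        have hfold : (s' ++ [c]).foldl (fun a c => 10 * a + (c.toNat : Int) - 48) 0
            = 10 * v' + (c.toNat : Int) - 48 := by
          rw [List.foldl_append]; rfl
        rw [hfold]
        constructor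
        · have htn : ((10 * v' + (c.toNat : Int) - 48)).toNat = 10 * v'.toNat + (c.toNat - 48) := by omega
          rw [htn, ← Nat.toDigits_append_toDigits (by norm_num) (by omega) (by omega), hrep,
            Nat.toDigits_of_lt_base (by omega), pv_digitChar_eq hc.1 hc.2]
        · omega

-- parse_index inverts str on canonical suffixes
lemma pv_parse_toChars {v : Int} (h : 0 ≤ v) :
    pvParseIndex (PySem.Int.toChars v) = some v := by
  have htc : PySem.Int.toChars v = Nat.toDigits 10 v.toNat := by
    simp [PySem.Int.toChars, not_lt.mpr h]
  rcases eq_or_lt_of_le h with hv0 | hv1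
  · rw [htc, ← hv0]
    decide
  · rw [htc]
    have hn : 1 ≤ v.toNat := by omega
    obtain ⟨c, t, hct⟩ := List.exists_cons_of_ne_nil
      (List.ne_nil_of_length_pos (Nat.length_toDigits_pos (b := 10) (n := v.toNat)))
    have hdig : ∀ d ∈ Nat.toDigits 10 v.toNat, '0' ≤ d ∧ d ≤ '9' :=
      fun d hd => pv_digit_of_mem_toDigits hd
    have hc0 : c ≠ '0' := pv_head_ne_zero hn (by rw [hct]; rfl)
    rw [hct]
    simp only [pvParseIndex, if_neg (by tauto : ¬(c = '0' ∧ c :: t ≠ ['0']))]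
    rw [← hct, pv_go_digits hdig, pv_foldl_toDigits]
    simp
    omega

lemma pv_parse_some {s : List Char} {v : Int} (h : pvParseIndex s = some v) :
    0 ≤ v ∧ PySem.Int.toChars v = s := by
  rcases s with _ | ⟨c, t⟩
  · simp [pvParseIndex] at h
  · simp only [pvParseIndex] at h
    split_ifs at h with hg
    have hdig := pv_go_some h
    rw [pv_go_digits hdig] at h
    have hv : v = (c :: t).foldl (fun a c => 10 * a + (c.toNat : Int) - 48) 0 := by
      simpa using h.symm
    rcases not_and_or.mp hg with hc | hs
    · -- leading digit is not '0': canonical expansion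
      have hc' : c ≠ '0' := by simpa using hc
      obtain ⟨hrep, hge⟩ := pv_canon (c :: t) (by simp) hdig (by simpa using hc')
      rw [← hv] at hrep hge
      refine ⟨by omega, ?_⟩
      rw [PySem.Int.toChars, if_neg (by omega), hrep]
    · -- s = ['0']
      have hs' : c :: t = ['0'] := by simpa using hs
      rw [hs'] at hv ⊢
      have : v = 0 := by
        rw [hv]
        decide
      rw [this]
      exact ⟨le_refl 0, by decide⟩


-- membership in the indexing pass
set_option maxHeartbeats 1000000 in
lemma pv_mem_taken_aux (newName : String) :
    ∀ (l : List String) (acc : PySem.Set Int) (v : Int),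
      (v ∈ l.foldl
        (fun taken name =>
          match (if PySem.Str.startswith name newName then
                   pvParseIndex (PySem.Str.slice name (some (PySem.Str.len newName)) none).toList
                 else none) with
          | some w => PySem.Set.add taken w
          | none => taken) acc) ↔
      v ∈ acc ∨ ∃ name ∈ l, PySem.Str.startswith name newName = true ∧
        pvParseIndex (PySem.Str.slice name (some (PySem.Str.len newName)) none).toList = some v := by
  intro l
  induction l with
  | nil => intro acc v; simp
  | cons name rest ih =>
      intro acc v
      rw [List.foldl_cons, ih]
      have hstep : ∀ (acc : PySem.Set Int),
          (v ∈ (match (if PySem.Str.startswith name newName then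
                   pvParseIndex (PySem.Str.slice name (some (PySem.Str.len newName)) none).toList
                 else none) with
          | some w => PySem.Set.add acc w
          | none => acc)) ↔
          v ∈ acc ∨ (PySem.Str.startswith name newName = true ∧
            pvParseIndex (PySem.Str.slice name (some (PySem.Str.len newName)) none).toList = some v) := by
        intro acc
        by_cases hsw : PySem.Str.startswith name newName = true
        · rw [if_pos hsw]
          cases hp : pvParseIndex (PySem.Str.slice name (some (PySem.Str.len newName)) none).toList with
          | none => simp
          | some w =>
              simp only [PySem.Set.mem_add, hsw, true_and, Option.some.injEq]
              tauto
        · rw [if_neg hsw]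
          simp only [iff_self_or]
          intro h
          exact absurd h.1 hsw
      rw [hstep]
      simp only [List.mem_cons]
      constructor
      · rintro ((h | h) | ⟨nm, hnm, hh⟩)
        · exact Or.inl h
        · exact Or.inr ⟨name, Or.inl rfl, h⟩
        · exact Or.inr ⟨nm, Or.inr hnm, hh⟩
      · rintro (h | ⟨nm, hnm | hnm, hh⟩)
        · exact Or.inl (Or.inl h)
        · exact Or.inl (Or.inr (hnm ▸ hh))
        · exact Or.inr ⟨nm, hnm, hh⟩

lemma pv_mem_taken {existingNames : List String} {newName : String} {v : Int} :
    v ∈ pvTaken existingNames newName ↔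
      ∃ name ∈ existingNames, PySem.Str.startswith name newName = true ∧
        pvParseIndex (PySem.Str.slice name (some (PySem.Str.len newName)) none).toList = some v := by
  unfold pvTaken
  rw [pv_mem_taken_aux]
  simp [PySem.Set.empty]

-- the suffix after a matching prefix, as characters
lemma pv_slice_toList {name newName : String} {t : List Char}
    (ht : newName.toList ++ t = name.toList) :
    (PySem.Str.slice name (some (PySem.Str.len newName)) none).toList = t := by
  rw [PySem.Str.toList_slice, PySem.Str.len_eq, PySem.Chars.slice_eq_listSlice,
    PySem.List.slice_from_natCast, ← ht, List.drop_left]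

lemma pv_taken_iff {existingNames : List String} {newName : String} {v : Int} :
    v ∈ pvTaken existingNames newName ↔
      0 ≤ v ∧ (newName ++ PySem.Int.toStr v) ∈ existingNames := by
  rw [pv_mem_taken]
  constructor
  · rintro ⟨name, hmem, hsw, hp⟩
    obtain ⟨hv, htc⟩ := pv_parse_some hp
    have hpre : newName.toList <+: name.toList := by
      rw [PySem.Str.startswith_eq, PySem.Chars.startswith_iff] at hsw; exact hsw
    obtain ⟨t, ht⟩ := hpre
    refine ⟨hv, ?_⟩
    have hname : newName ++ PySem.Int.toStr v = name := by
      apply String.toList_injective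
      rw [String.toList_append, PySem.Int.toList_toStr, htc, pv_slice_toList ht, ht]
    rwa [hname]
  · rintro ⟨hv, hmem⟩
    refine ⟨newName ++ PySem.Int.toStr v, hmem, ?_, ?_⟩
    · rw [PySem.Str.startswith_eq, PySem.Chars.startswith_iff, String.toList_append]
      exact ⟨(PySem.Int.toStr v).toList, rfl⟩
    · rw [pv_slice_toList (t := (PySem.Int.toStr v).toList) (by rw [String.toList_append]),
        PySem.Int.toList_toStr]
      exact pv_parse_toChars hv

lemma pv_taken_nodup_aux (newName : String) :
    ∀ (l : List String) (acc : PySem.Set Int), acc.Nodup →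
      (l.foldl
        (fun taken name =>
          match (if PySem.Str.startswith name newName then
                   pvParseIndex (PySem.Str.slice name (some (PySem.Str.len newName)) none).toList
                 else none) with
          | some w => PySem.Set.add taken w
          | none => taken) acc).Nodup := by
  intro l
  induction l with
  | nil => intro acc h; exact h
  | cons name rest ih =>
      intro acc h
      rw [List.foldl_cons]
      apply ih
      cases (if PySem.Str.startswith name newName then
               pvParseIndex (PySem.Str.slice name (some (PySem.Str.len newName)) none).toList
             else none) with
      | none => exact h
      | some w => exact PySem.Set.nodup_add _ _ h

lemma pv_taken_nodup (existingNames : List String) (newName : String) :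
    (pvTaken existingNames newName).Nodup := by
  unfold pvTaken
  exact pv_taken_nodup_aux newName existingNames PySem.Set.empty (by simp [PySem.Set.empty])

-- the gap scan returns the least free index ≥ k
lemma pv_scan_spec (newName : String) :
    ∀ (L : List Int), L.Pairwise (· < ·) → ∀ k : Int,
      ∃ j : Int, pvScan newName L k = newName ++ PySem.Int.toStr j ∧ k ≤ j ∧ j ∉ L ∧
        ∀ i, k ≤ i → i < j → i ∈ L := by
  intro L
  induction L with
  | nil =>
      intro _ k
      exact ⟨k, rfl, le_refl k, by simp, fun i h1 h2 => absurd h2 (by omega)⟩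
  | cons v rest ih =>
      intro hp k
      have hv : ∀ x ∈ rest, v < x := (List.pairwise_cons.mp hp).1
      have hrest := (List.pairwise_cons.mp hp).2
      by_cases hvk : v = k
      · obtain ⟨j, heq, hle, hnot, hall⟩ := ih hrest (k + 1)
        refine ⟨j, ?_, by omega, ?_, ?_⟩
        · rw [pvScan, if_pos hvk]; exact heq
        · intro hj
          rcases List.mem_cons.mp hj with rfl | hj
          · omega
          · exact hnot hj
        · intro i h1 h2
          rcases eq_or_lt_of_le h1 with rfl | h1'
          · exact List.mem_cons.mpr (Or.inl hvk.symm)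
          · exact List.mem_cons.mpr (Or.inr (hall i (by omega) h2))
      · by_cases hkv : k < v
        · refine ⟨k, ?_, le_refl k, ?_, fun i h1 h2 => absurd h2 (by omega)⟩
          · rw [pvScan, if_neg hvk, if_pos hkv]
          · intro hk
            rcases List.mem_cons.mp hk with rfl | hk
            · omega
            · exact absurd (hv k hk) (by omega)
        · obtain ⟨j, heq, hle, hnot, hall⟩ := ih hrest k
          refine ⟨j, ?_, hle, ?_, ?_⟩
          · rw [pvScan, if_neg hvk, if_neg hkv]; exact heq
          · intro hj
            rcases List.mem_cons.mp hj with rfl | hj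
            · omega
            · exact hnot hj
          · exact fun i h1 h2 => List.mem_cons.mpr (Or.inr (hall i h1 h2))

-- A's loop reaches the least free index
lemma pv_probeA_eq (existingNames : List String) (newName : String) :
    ∀ (fuel : Nat) (k j : Int), k ≤ j →
      (newName ++ PySem.Int.toStr j) ∉ existingNames →
      (∀ i, k ≤ i → i < j → (newName ++ PySem.Int.toStr i) ∈ existingNames) →
      j - k < (fuel : Int) →
      pvProbeA existingNames newName fuel (k + 1) (newName ++ PySem.Int.toStr k)
        = newName ++ PySem.Int.toStr j := by
  intro fuel
  induction fuel with
  | zero => intro k j h1 _ _ h4; exact absurd h4 (by omega)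
  | succ f ihf =>
      intro k j h1 h2 h3 h4
      rw [pvProbeA]
      by_cases hmem : (newName ++ PySem.Int.toStr k) ∈ existingNames
      · rw [if_pos hmem]
        have hkj : k < j := by
          rcases eq_or_lt_of_le h1 with rfl | h
          · exact absurd hmem h2
          · exact h
        exact ihf (k + 1) j (by omega) h2 (fun i hi1 hi2 => h3 i (by omega) hi2) (by omega)
      · rw [if_neg hmem]
        rcases eq_or_lt_of_le h1 with rfl | h
        · rfl
        · exact absurd (h3 k (le_refl k) h) hmem

-- pigeonhole: newName together with the taken candidates below j are distinct members
lemma pv_fuel_bound {existingNames : List String} {newName : String} {j : Int}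
    (hj : 1 ≤ j) (hmem : newName ∈ existingNames)
    (hall : ∀ i, 1 ≤ i → i < j → (newName ++ PySem.Int.toStr i) ∈ existingNames) :
    j - 1 < (existingNames.length : Int) := by
  set W : List String :=
    newName :: (List.range (j - 1).toNat).map (fun (t : Nat) => newName ++ PySem.Int.toStr (1 + (t : Int)))
    with hW
  have hsub : W ⊆ existingNames := by
    intro x hx
    rcases List.mem_cons.mp hx with rfl | hx
    · exact hmem
    · obtain ⟨t, ht, rfl⟩ := List.mem_map.mp hx
      have ht' : (t : Int) < j - 1 := by
        have := List.mem_range.mp ht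
        omega
      exact hall (1 + (t : Int)) (by omega) (by omega)
  have hnodup : W.Nodup := by
    rw [hW, List.nodup_cons]
    constructor
    · intro hmm
      obtain ⟨t, _, heq⟩ := List.mem_map.mp hmm
      have := congrArg (fun s => s.toList.length) heq
      simp only [String.toList_append, List.length_append] at this
      have hlen : 0 < (PySem.Int.toStr (1 + (t : Int))).toList.length := by
        rw [PySem.Int.toList_toStr, PySem.Int.toChars]
        split_ifs
        · simp
        · exact Nat.length_toDigits_pos
      omega
    · refine List.Nodup.map ?_ List.nodup_range
      intro a b hab
      have h1 := congrArg String.toList hab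
      rw [String.toList_append, String.toList_append] at h1
      have h2 := List.append_cancel_left h1
      rw [PySem.Int.toList_toStr, PySem.Int.toList_toStr] at h2
      have hpa := pv_parse_toChars (v := 1 + (a : Int)) (by omega)
      have hpb := pv_parse_toChars (v := 1 + (b : Int)) (by omega)
      rw [h2, hpb] at hpa
      have : 1 + (a : Int) = 1 + (b : Int) := by injection hpa.symm
      omega
  have hlen := (hnodup.subperm hsub).length_le
  rw [hW] at hlen
  simp only [List.length_cons, List.length_map, List.length_range] at hlen
  omega

-- ===== VERDICT (by name: the statement is the Claim_ definition above) =====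
theorem newMember_spec : Claim_equal_newMember := by
  intro existingNames newName _
  unfold Spec_newMember newMember newMember_alt
  by_cases h : newName ∈ existingNames
  · rw [if_neg (not_not_intro h)]
    rw [pvProbeA, if_pos h]
    set L := PySem.List.sorted (pvTaken existingNames newName) (fun x => x) false with hL
    have hperm : L.Perm (pvTaken existingNames newName) := PySem.List.sorted_perm _ _ _
    have hnd : L.Nodup := hperm.nodup_iff.mpr (pv_taken_nodup existingNames newName)
    have hle : L.Pairwise (fun a b => a ≤ b) := PySem.List.sorted_pairwise _ _
    have hpl : L.Pairwise (· < ·) :=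
      (hle.and hnd).imp (fun hab => lt_of_le_of_ne hab.1 hab.2)
    obtain ⟨j, heq, hj1, hnot, hall⟩ := pv_scan_spec newName L hpl 1
    have hmemL : ∀ i : Int, i ∈ L ↔ i ∈ pvTaken existingNames newName :=
      fun i => hperm.mem_iff
    have hPnot : (newName ++ PySem.Int.toStr j) ∉ existingNames := fun hc =>
      hnot ((hmemL j).mpr (pv_taken_iff.mpr ⟨by omega, hc⟩))
    have hPall : ∀ i, 1 ≤ i → i < j → (newName ++ PySem.Int.toStr i) ∈ existingNames :=
      fun i h1 h2 => (pv_taken_iff.mp ((hmemL i).mp (hall i h1 h2))).2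
    have hfuel := pv_fuel_bound hj1 h hPall
    rw [pv_probeA_eq existingNames newName existingNames.length 1 j hj1 hPnot hPall
      (by omega), heq]
  · rw [if_pos h, pvProbeA, if_neg h]
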